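-- pv_equiv track=rewrite | github.com/davidgamero/terminal-gatech-2019 | great-wall/buildingFunctions.py | getColumnsLeft
-- ===== SOURCE A (Python) =====
-- def getColumnsLeft(startx):
--     x = startx
--     y = startx+14
--     columnIndices = [[x,y]]
--     x+=1
--     columnIndices.append([x,y])
--     y-=1
--     while y>startx:
--         columnIndices.append([x,y])
--         x+=1
--         columnIndices.append([x,y])
--         y-=1
--
--     columnIndices.append([x,y])
--     return columnIndices
-- ===== SOURCE B (Python) =====
-- def getColumnsLeft(startx):
--     # closed form for the j-th of the 29 pairs: x advances on odd steps, y drops on even steps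
--     return [[startx + (j + 1) // 2, startx + 14 - j // 2] for j in range(29)]
-- ===== Notes on version B (the rewrite author's own statement) =====
-- stated objective: simpler
-- what changed: Replaces A's stateful while loop (mutable x/y pointers, two appends per iteration, special-cased pre/post-loop appends) by a single comprehension producing the j-th pair directly from its index via the closed form [startx+(j+1)//2, startx+14-j//2] for j in range(29).
import Mathlib
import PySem

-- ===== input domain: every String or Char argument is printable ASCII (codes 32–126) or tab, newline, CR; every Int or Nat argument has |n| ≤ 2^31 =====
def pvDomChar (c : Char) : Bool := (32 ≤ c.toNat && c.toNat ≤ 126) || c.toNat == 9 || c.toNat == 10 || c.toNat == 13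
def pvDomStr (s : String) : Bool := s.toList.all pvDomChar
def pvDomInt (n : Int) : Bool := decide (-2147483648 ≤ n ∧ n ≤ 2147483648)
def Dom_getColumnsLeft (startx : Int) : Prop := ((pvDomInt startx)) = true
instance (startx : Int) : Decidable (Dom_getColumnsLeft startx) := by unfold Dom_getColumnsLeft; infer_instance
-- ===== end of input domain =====

-- B replaces A's stateful while loop by a single comprehension computing the j-th pair
-- in closed form from its index j (objective: simpler).

-- ===== PORT A =====
-- A's while loop: state (x, y, columnIndices); terminates since y - startx decreases.
def getColumnsLeft_loop (startx x y : Int) (acc : List (List Int)) : List (List Int) :=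
  if y > startx then
    getColumnsLeft_loop startx (x + 1) (y - 1) (acc ++ [[x, y], [x + 1, y]])
  else
    acc ++ [[x, y]]
termination_by (y - startx).toNat
decreasing_by omega

def getColumnsLeft (startx : Int) : List (List Int) :=
  -- x = startx; y = startx+14; [[x,y]]; x+=1; append [x,y]; y-=1; loop
  getColumnsLeft_loop startx (startx + 1) (startx + 13)
    [[startx, startx + 14], [startx + 1, startx + 14]]

-- ===== PORT B =====
def getColumnsLeft_alt (startx : Int) : List (List Int) :=
  (PySem.List.pyRange 0 29 1).map
    (fun j => [startx + PySem.Int.floordiv (j + 1) 2, startx + 14 - PySem.Int.floordiv j 2])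

-- ===== PRECONDITION & SPEC =====
def Spec_getColumnsLeft (startx : Int) (out : List (List Int)) : Prop := out = getColumnsLeft_alt startx
instance (startx : Int) (out : List (List Int)) : Decidable (Spec_getColumnsLeft startx out) := by unfold Spec_getColumnsLeft; infer_instance

-- ===== CLAIM (what is proved, stated in full; the proofs are below) =====
def Claim_equal_getColumnsLeft : Prop := ∀ (startx : Int), Dom_getColumnsLeft startx → Spec_getColumnsLeft startx (getColumnsLeft startx)

-- ===== LEMMAS AND PROOFS =====

-- ===== VERDICT (by name: the statement is the Claim_ definition above) =====
set_option maxRecDepth 4000 in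
theorem getColumnsLeft_spec : Claim_equal_getColumnsLeft := by
  intro startx _
  unfold Spec_getColumnsLeft getColumnsLeft getColumnsLeft_alt
  have hr : PySem.List.pyRange 0 29 1 =
      [0,1,2,3,4,5,6,7,8,9,10,11,12,13,14,15,16,17,18,19,20,21,22,23,24,25,26,27,28] := by decide
  rw [hr]
  rw [getColumnsLeft_loop, if_pos (by omega)]
  rw [getColumnsLeft_loop, if_pos (by omega)]
  rw [getColumnsLeft_loop, if_pos (by omega)]
  rw [getColumnsLeft_loop, if_pos (by omega)]
  rw [getColumnsLeft_loop, if_pos (by omega)]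
  rw [getColumnsLeft_loop, if_pos (by omega)]
  rw [getColumnsLeft_loop, if_pos (by omega)]
  rw [getColumnsLeft_loop, if_pos (by omega)]
  rw [getColumnsLeft_loop, if_pos (by omega)]
  rw [getColumnsLeft_loop, if_pos (by omega)]
  rw [getColumnsLeft_loop, if_pos (by omega)]
  rw [getColumnsLeft_loop, if_pos (by omega)]
  rw [getColumnsLeft_loop, if_pos (by omega)]
  rw [getColumnsLeft_loop, if_neg (by omega)]
  simp only [List.map, List.cons_append, List.nil_append]
  norm_num [PySem.Int.floordiv, Int.fdiv]
  omega
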